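-- pv_equiv track=rewrite | github.com/malexandra06/UBB-FMI-Informatica | FP/lab13FP/pythonProject/bkt.py | produs
-- ===== SOURCE A (Python) =====
-- def produs(l,left,right):
--    if left>right:
--        return 1
--    if left==right:
--        if left%2==0:
--             return l[right]
--        else: return 1
--    m=(left+right)//2
--    prod_left=produs(l,left,m)
--    prod_right=produs(l,m+1,right)
--    return prod_left*prod_right
-- ===== SOURCE B (Python) =====
-- def produs(l, left, right):
--     p = 1
--     for i in range(left, right + 1):
--         if i % 2 == 0:
--             p *= l[i]
--     return p
-- ===== Notes on version B (the rewrite author's own statement) =====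
-- stated objective: simpler
-- what changed: Replaces A's balanced divide-and-conquer recursion over the index interval with a single flat loop over range(left, right+1) that multiplies in l[i] exactly when i is even.
import Mathlib
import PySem

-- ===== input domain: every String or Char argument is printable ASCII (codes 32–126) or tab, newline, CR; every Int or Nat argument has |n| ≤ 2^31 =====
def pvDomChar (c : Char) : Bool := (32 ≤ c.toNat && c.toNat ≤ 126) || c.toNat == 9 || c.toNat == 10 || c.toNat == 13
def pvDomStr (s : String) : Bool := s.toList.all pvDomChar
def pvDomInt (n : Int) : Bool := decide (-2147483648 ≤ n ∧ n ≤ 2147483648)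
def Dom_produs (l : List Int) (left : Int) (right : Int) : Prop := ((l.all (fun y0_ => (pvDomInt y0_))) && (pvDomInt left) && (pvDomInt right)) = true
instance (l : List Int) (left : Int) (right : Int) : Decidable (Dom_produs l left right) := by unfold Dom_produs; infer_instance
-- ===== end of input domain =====

-- B replaces A's divide-and-conquer recursion with one flat loop over the index range
-- (objective: simpler; same return value on every input admitted by Pre_produs).

-- ===== PORT A =====
-- l[right] is ported as pyGet? with default 0; Pre_produs excludes the inputs where
-- Python's l[right] raises IndexError, so the default is never claimed about.
def produs (l : List Int) (left : Int) (right : Int) : Int :=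
  if left > right then 1
  else if left = right then
    (if PySem.Int.mod left 2 = 0 then (PySem.List.pyGet? l right).getD 0 else 1)
  else
    let m := PySem.Int.floordiv (left + right) 2
    let prod_left := produs l left m
    let prod_right := produs l (m + 1) right
    prod_left * prod_right
termination_by (right - left).toNat
decreasing_by
  all_goals
    rename_i h1 h2
    have hlt : left < right := by omega
    have hm := PySem.Int.floordiv_two_mid_bounds (le_of_lt hlt)
    have hmr : PySem.Int.floordiv (left + right) 2 < right := by
      rw [PySem.Int.floordiv_lt_iff_lt_mul (by omega : (0:Int) < 2)]; omega
    omega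

-- ===== PORT B =====
def produs_alt (l : List Int) (left : Int) (right : Int) : Int :=
  (PySem.List.pyRange left (right + 1) 1).foldl
    (fun p i => if PySem.Int.mod i 2 = 0 then p * (PySem.List.pyGet? l i).getD 0 else p) 1

-- ===== PRECONDITION & SPEC =====
-- Exactly the inputs where Python A returns: every even index i in [left, right] must be
-- a valid (possibly negative) Python index into l; A (and B) raise IndexError otherwise.
-- lo/hi are the smallest/largest even index in [left, right]; either there is none,
-- or both extremes (hence all even indices between them) are valid Python indices into l.
def Pre_produs (l : List Int) (left : Int) (right : Int) : Prop :=
  (if left % 2 = 0 then left else left + 1) > (if right % 2 = 0 then right else right - 1) ∨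
    (-(l.length : Int) ≤ (if left % 2 = 0 then left else left + 1) ∧
      (if right % 2 = 0 then right else right - 1) < (l.length : Int))
instance (l : List Int) (left : Int) (right : Int) : Decidable (Pre_produs l left right) := by
  unfold Pre_produs; infer_instance
def pvWitness_produs : List Int × Int × Int := ([2, 3, 4], 0, 2)

def Spec_produs (l : List Int) (left : Int) (right : Int) (out : Int) : Prop := out = produs_alt l left right
instance (l : List Int) (left : Int) (right : Int) (out : Int) : Decidable (Spec_produs l left right out) := by unfold Spec_produs; infer_instance

-- ===== CLAIM (what is proved, stated in full; the proofs are below) =====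
def Claim_equal_produs : Prop := ∀ (l : List Int) (left : Int) (right : Int), Dom_produs l left right → Pre_produs l left right → Spec_produs l left right (produs l left right)

-- ===== LEMMAS AND PROOFS =====

-- the per-index factor both programs multiply in
def pvFactor (l : List Int) (i : Int) : Int :=
  if PySem.Int.mod i 2 = 0 then (PySem.List.pyGet? l i).getD 0 else 1

theorem foldl_factor (l : List Int) (xs : List Int) (acc : Int) :
    xs.foldl (fun p i => if PySem.Int.mod i 2 = 0 then p * (PySem.List.pyGet? l i).getD 0 else p) acc
      = acc * (xs.map (pvFactor l)).prod := by
  induction xs generalizing acc with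
  | nil => simp
  | cons x xs ih =>
    simp only [List.foldl_cons, List.map_cons, List.prod_cons, ih, pvFactor]
    split_ifs <;> ring

theorem produs_alt_eq (l : List Int) (a b : Int) :
    produs_alt l a b = ((PySem.List.pyRange a (b + 1) 1).map (pvFactor l)).prod := by
  rw [produs_alt, foldl_factor, one_mul]

theorem produs_eq (l : List Int) (a b : Int) :
    produs l a b = ((PySem.List.pyRange a (b + 1) 1).map (pvFactor l)).prod := by
  by_cases hgt : a > b
  · rw [produs, if_pos hgt, PySem.List.pyRange_one_eq_nil (by omega)]; simp
  · by_cases heq : a = b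
    · subst heq
      rw [produs, if_neg hgt, if_pos rfl, PySem.List.pyRange_one_singleton]
      simp only [List.map_cons, List.map_nil, List.prod_cons, List.prod_nil, mul_one, pvFactor]
    · have hlt : a < b := by omega
      rw [produs, if_neg hgt, if_neg heq]
      have hm := PySem.Int.floordiv_two_mid_bounds (le_of_lt hlt)
      have hmr : PySem.Int.floordiv (a + b) 2 < b := by
        rw [PySem.Int.floordiv_lt_iff_lt_mul (by omega : (0:Int) < 2)]; omega
      simp only
      rw [produs_eq l a (PySem.Int.floordiv (a + b) 2),
          produs_eq l (PySem.Int.floordiv (a + b) 2 + 1) b,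
          PySem.List.pyRange_one_append a (PySem.Int.floordiv (a + b) 2 + 1) (b + 1)
            (by omega) (by omega),
          List.map_append, List.prod_append]
termination_by (b - a).toNat
decreasing_by
  · omega
  · omega

-- ===== VERDICT (by name: the statement is the Claim_ definition above) =====
theorem produs_spec : Claim_equal_produs := by
  intro l left right _ _
  unfold Spec_produs
  rw [produs_eq, produs_alt_eq]
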